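-- pv_equiv track=rewrite | github.com/Lukasz-G/Hydra | Hydra/LoadingCorpus.py | mark_tags_for_multitoken
-- ===== SOURCE A (Python) =====
-- def mark_tags_for_multitoken(tag_list):#lemma,tag,morph
--     length = len(tag_list)
--     new_list = []
--     for nb, tag in enumerate(tag_list):
--         if nb == 0:
--             new_list.append(tag + '>')
--         if nb == length-1:
--             new_list.append('<' + tag)
--         elif nb != 0 and nb != length-1:
--             new_list.append('<' + tag + '>')
--
--     return new_list
-- ===== SOURCE B (Python) =====
-- def mark_tags_for_multitoken(tag_list):
--     if not tag_list:
--         return []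
--     return ([tag_list[0] + '>']
--             + ['<' + tag + '>' for tag in tag_list[1:-1]]
--             + ['<' + tag_list[-1]])
-- ===== Notes on version B (the rewrite author's own statement) =====
-- stated objective: simpler
-- what changed: Replaces the per-element index comparisons inside an enumerate loop by a direct decomposition: first element + mapped interior slice + last element, with an empty-list guard.
import Mathlib
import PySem

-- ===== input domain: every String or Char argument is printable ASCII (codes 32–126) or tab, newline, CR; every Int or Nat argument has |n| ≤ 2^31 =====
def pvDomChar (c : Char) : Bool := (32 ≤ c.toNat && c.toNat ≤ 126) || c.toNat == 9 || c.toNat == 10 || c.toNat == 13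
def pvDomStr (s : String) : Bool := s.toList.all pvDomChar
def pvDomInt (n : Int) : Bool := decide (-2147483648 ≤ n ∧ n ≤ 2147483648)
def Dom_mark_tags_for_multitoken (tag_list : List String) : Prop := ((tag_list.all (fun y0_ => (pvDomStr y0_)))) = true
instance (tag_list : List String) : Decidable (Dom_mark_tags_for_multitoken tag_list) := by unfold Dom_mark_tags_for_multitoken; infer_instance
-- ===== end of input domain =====

-- B builds the result as first + mapped interior slice + last instead of A's per-index branching; objective: simpler.

-- ===== PORT A =====
def mark_tags_for_multitoken (tag_list : List String) : List String :=
  let length : Int := tag_list.length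
  (PySem.List.enumerate tag_list 0).foldl (fun new_list p =>
    let nb := p.1
    let tag := p.2
    let new_list := if nb = 0 then new_list ++ [tag ++ ">"] else new_list
    if nb = length - 1 then new_list ++ ["<" ++ tag]
    else if nb ≠ 0 ∧ nb ≠ length - 1 then new_list ++ ["<" ++ tag ++ ">"]
    else new_list) []

-- ===== PORT B =====
def mark_tags_for_multitoken_alt (tag_list : List String) : List String :=
  match tag_list with
  | [] => []
  | t :: rest =>
    ((t ++ ">") :: (PySem.List.slice tag_list (some 1) (some (-1))).map
        (fun tag => "<" ++ tag ++ ">"))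
      ++ ["<" ++ rest.getLastD t]   -- tag_list[-1]; 'getLast t' on rest: t if rest = [] (the length-1 case)

-- ===== PRECONDITION & SPEC =====
def Spec_mark_tags_for_multitoken (tag_list : List String) (out : List String) : Prop := out = mark_tags_for_multitoken_alt tag_list
instance (tag_list : List String) (out : List String) : Decidable (Spec_mark_tags_for_multitoken tag_list out) := by unfold Spec_mark_tags_for_multitoken; infer_instance

-- ===== CLAIM (what is proved, stated in full; the proofs are below) =====
def Claim_equal_mark_tags_for_multitoken : Prop := ∀ (tag_list : List String), Dom_mark_tags_for_multitoken tag_list → Spec_mark_tags_for_multitoken tag_list (mark_tags_for_multitoken tag_list)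

-- ===== LEMMAS AND PROOFS =====

-- A's loop body, with the full list's length as parameter L.
def pvStepA (L : Int) (new_list : List String) (p : Int × String) : List String :=
  let nb := p.1
  let tag := p.2
  let new_list := if nb = 0 then new_list ++ [tag ++ ">"] else new_list
  if nb = L - 1 then new_list ++ ["<" ++ tag]
  else if nb ≠ 0 ∧ nb ≠ L - 1 then new_list ++ ["<" ++ tag ++ ">"]
  else new_list

lemma pvStepA_mid (L : Int) (acc : List String) (nb : Int) (tag : String)
    (h0 : nb ≠ 0) (h1 : nb ≠ L - 1) :
    pvStepA L acc (nb, tag) = acc ++ ["<" ++ tag ++ ">"] := by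
  simp [pvStepA, h0, h1]

-- Folding A's body over the interior indices appends exactly the mapped interior.
lemma pvFold_mid (L : Int) (mid : List String) :
    ∀ (s : Int) (acc : List String), 1 ≤ s → s + mid.length ≤ L - 1 →
    (PySem.List.enumerate mid s).foldl (pvStepA L) acc
      = acc ++ mid.map (fun tag => "<" ++ tag ++ ">") := by
  induction mid with
  | nil => intro s acc _ _; simp [PySem.List.enumerate_nil]
  | cons x xs ih =>
    intro s acc h1 h2
    rw [PySem.List.enumerate_cons, List.foldl_cons,
        pvStepA_mid L acc s x (by omega) (by simp at h2; omega),
        ih (s + 1) _ (by omega) (by simp at h2 ⊢; omega)]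
    simp

-- The slice tag_list[1:-1] of t :: mid ++ [z] is mid.
lemma pvSlice_interior (t z : String) (mid : List String) :
    PySem.List.slice (t :: (mid ++ [z])) (some 1) (some (-1)) = mid := by
  simp [PySem.List.slice]

lemma pvA_eq (l : List String) :
    mark_tags_for_multitoken l
      = (PySem.List.enumerate l 0).foldl (pvStepA l.length) [] := rfl

-- ===== VERDICT (by name: the statement is the Claim_ definition above) =====
theorem mark_tags_for_multitoken_spec : Claim_equal_mark_tags_for_multitoken := by
  intro tag_list _
  unfold Spec_mark_tags_for_multitoken
  match tag_list with
  | [] => rfl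
  | t :: rest =>
    rcases List.eq_nil_or_concat rest with rfl | ⟨mid, z, rfl⟩
    · -- length-1 case: both emit the element twice
      rw [pvA_eq]
      simp [PySem.List.enumerate, pvStepA, mark_tags_for_multitoken_alt,
            PySem.List.slice]
    · simp only [List.concat_eq_append]
      rw [pvA_eq, PySem.List.enumerate_cons, List.foldl_cons,
          PySem.List.enumerate_append, List.foldl_append]
      simp only [zero_add]
      have hL : ((t :: (mid ++ [z])).length : Int) = (mid.length : Int) + 2 := by
        simp; omega
      have hfirst : pvStepA ((t :: (mid ++ [z])).length : Int) [] (0, t)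
          = [t ++ ">"] := by
        simp [pvStepA]; omega
      rw [hfirst,
          pvFold_mid _ mid 1 [t ++ ">"] le_rfl (by rw [hL]; omega)]
      have hlast : pvStepA ((t :: (mid ++ [z])).length : Int)
          ([t ++ ">"] ++ mid.map (fun tag => "<" ++ tag ++ ">"))
          (1 + (mid.length : Int), z)
          = ([t ++ ">"] ++ mid.map (fun tag => "<" ++ tag ++ ">")) ++ ["<" ++ z] := by
        have h0 : (1 : Int) + (mid.length : Int) ≠ 0 := by omega
        have h1 : (1 : Int) + (mid.length : Int)
            = ((t :: (mid ++ [z])).length : Int) - 1 := by rw [hL]; omega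
        simp only [pvStepA]
        rw [if_neg h0, if_pos h1]
      rw [show PySem.List.enumerate [z] (1 + (mid.length:Int)) = [(1 + (mid.length:Int), z)] from by simp [PySem.List.enumerate], List.foldl_cons, List.foldl_nil, hlast]
      simp [mark_tags_for_multitoken_alt, pvSlice_interior]
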